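-- pv_equiv track=rewrite | github.com/3liasP/Programming-Basics | Tutoriaalit 5/20. Laske kertomat sanakirjaan.py | kertomat
-- ===== SOURCE A (Python) =====
-- def kertomat(luvut: list) -> dict:
--     sanakirja = {}
--     fact = 1
--     for luku in luvut:
--         for i in range (luku, luku+1):
--             fact = fact * i
--             sanakirja[fact] = i
--     return sanakirja
-- ===== SOURCE B (Python) =====
-- def _prefixes(xs):
--     # divide-and-conquer prefix-product scan: scan each half, then lift the
--     # right half's scan by the left half's total product
--     if len(xs) <= 1:
--         return list(xs)
--     m = len(xs) // 2
--     left = _prefixes(xs[:m])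
--     right = _prefixes(xs[m:])
--     last = left[-1]
--     return left + [last * r for r in right]
--
--
-- def kertomat(luvut: list) -> dict:
--     return dict(zip(_prefixes(luvut), luvut))
-- ===== Notes on version B (the rewrite author's own statement) =====
-- stated objective: alternative
-- what changed: A fuses a running product and dict insertion into one sequential loop; B computes the prefix-product list by a recursive divide-and-conquer scan (scan each half, lift the right half's scan by the left half's total) and then builds the dict in a separate dict(zip(...)) pass.
import Mathlib
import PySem

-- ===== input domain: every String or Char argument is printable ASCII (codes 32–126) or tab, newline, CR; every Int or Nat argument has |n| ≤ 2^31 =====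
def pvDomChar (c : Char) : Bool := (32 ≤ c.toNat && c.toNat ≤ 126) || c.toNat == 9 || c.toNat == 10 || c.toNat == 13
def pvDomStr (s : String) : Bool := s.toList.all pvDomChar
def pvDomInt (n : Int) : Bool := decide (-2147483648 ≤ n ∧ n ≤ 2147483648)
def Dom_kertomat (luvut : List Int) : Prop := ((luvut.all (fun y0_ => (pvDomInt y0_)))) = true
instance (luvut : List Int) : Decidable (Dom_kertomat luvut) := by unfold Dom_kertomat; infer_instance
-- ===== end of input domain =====

-- B replaces A's fused running-product loop by a divide-and-conquer prefix-product scan followed by dict(zip(...)) construction (alternative decomposition).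


-- ===== PORT A =====
-- literal port of A: outer loop over luvut, inner loop over range(luku, luku+1), state (sanakirja, fact)
def kertomat (luvut : List Int) : List (Int × Int) :=
  (luvut.foldl
    (fun (st : PySem.Dict Int Int × Int) luku =>
      (PySem.List.pyRange luku (luku + 1) 1).foldl
        (fun (st : PySem.Dict Int Int × Int) i =>
          let fact := st.2 * i
          (st.1.insert fact i, fact))
        st)
    (PySem.Dict.empty, 1)).1.items

-- ===== PORT B =====
-- _prefixes: divide-and-conquer prefix-product scan.  xs[:m] / xs[m:] are
-- take m / drop m (exact for the nonnegative bound m, PySem.List.slice_to_natCast /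
-- slice_from_natCast); left[-1] is PySem.List.pyGetD left (-1) with an unused
-- default, exact because left is nonempty on that branch.
def prefixesDC (xs : List Int) : List Int :=
  if _h : xs.length ≤ 1 then xs
  else
    let m := xs.length / 2
    let left := prefixesDC (xs.take m)
    let right := prefixesDC (xs.drop m)
    let last := PySem.List.pyGetD left (-1) 0
    left ++ right.map (fun r => last * r)
termination_by xs.length
decreasing_by
  · simp only [List.length_take]
    omega
  · simp only [List.length_drop]
    omega

-- dict(zip(_prefixes(luvut), luvut))
def kertomat_alt (luvut : List Int) : List (Int × Int) :=
  (((prefixesDC luvut).zip luvut).foldl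
    (fun (d : PySem.Dict Int Int) q => d.insert q.1 q.2) PySem.Dict.empty).items

-- ===== PRECONDITION & SPEC =====
def Spec_kertomat (luvut : List Int) (out : List (Int × Int)) : Prop := out = kertomat_alt luvut
instance (luvut : List Int) (out : List (Int × Int)) : Decidable (Spec_kertomat luvut out) := by unfold Spec_kertomat; infer_instance

-- ===== CLAIM =====
def Claim_equal_kertomat : Prop := ∀ (luvut : List Int), Dom_kertomat luvut → Spec_kertomat luvut (kertomat luvut)

-- ===== LEMMAS AND PROOFS =====

-- range(a, a+1) is the single element [a]
theorem pyRange_self_succ (a : Int) : PySem.List.pyRange a (a + 1) 1 = [a] := by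
  rw [PySem.List.pyRange_one_cons (by omega)]
  simp

-- reference prefix-product list: ppRef xs = [x1, x1*x2, …]
def ppRef : List Int → List Int
  | [] => []
  | x :: l => x :: (ppRef l).map (fun y => x * y)

theorem ppRef_ne_nil (xs : List Int) (h : xs ≠ []) : ppRef xs ≠ [] := by
  cases xs with
  | nil => exact absurd rfl h
  | cons x l => simp [ppRef]

theorem ppRef_getLast? (xs : List Int) (h : xs ≠ []) :
    (ppRef xs).getLast? = some xs.prod := by
  induction xs with
  | nil => exact absurd rfl h
  | cons x l ih =>
    cases l with
    | nil => simp [ppRef]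
    | cons y t =>
      have hne : ppRef (y :: t) ≠ [] := ppRef_ne_nil _ (by simp)
      have hstep : (ppRef (x :: y :: t)).getLast? = ((ppRef (y :: t)).map (fun z => x * z)).getLast? := by
        rw [show ppRef (x :: y :: t) = x :: (ppRef (y :: t)).map (fun z => x * z) from rfl]
        cases hm : (ppRef (y :: t)).map (fun z => x * z) with
        | nil => exact absurd (by simpa using hm) hne
        | cons a b => exact List.getLast?_cons_cons
      rw [hstep, List.getLast?_map, ih (by simp)]
      simp [List.prod_cons]

-- the left half's last prefix product, as Python reads it (left[-1])
theorem ppRef_pyGetD_neg_one (xs : List Int) (h : xs ≠ []) :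
    PySem.List.pyGetD (ppRef xs) (-1) 0 = xs.prod := by
  have hne := ppRef_ne_nil xs h
  rw [PySem.List.pyGetD_neg_one (ppRef xs) 0 hne]
  have h1 := ppRef_getLast? xs h
  have h2 := List.getLast?_eq_some_getLast (l := ppRef xs) hne
  rw [h2] at h1
  exact Option.some_injective _ h1

-- splitting law of the prefix-product scan
theorem ppRef_append (u v : List Int) :
    ppRef (u ++ v) = ppRef u ++ (ppRef v).map (fun y => u.prod * y) := by
  induction u with
  | nil => simp [ppRef]
  | cons x u' ih =>
    simp only [List.cons_append, ppRef, ih, List.map_append, List.map_map]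
    simp [mul_assoc]

-- the divide-and-conquer scan computes the prefix products
theorem prefixesDC_eq (xs : List Int) : prefixesDC xs = ppRef xs := by
  induction xs using prefixesDC.induct with
  | case1 xs h =>
    rw [prefixesDC, dif_pos h]
    cases xs with
    | nil => simp [ppRef]
    | cons x l =>
      cases l with
      | nil => simp [ppRef]
      | cons y t => simp at h
  | case2 xs h m ihl ihr =>
    rw [prefixesDC, dif_neg h]
    simp only
    rw [ihl, ihr]
    have hne : xs.take (xs.length / 2) ≠ [] := by
      have : (xs.take (xs.length / 2)).length = xs.length / 2 := by
        simp only [List.length_take]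
        omega
      intro hc
      rw [hc] at this
      simp at this
      omega
    rw [ppRef_pyGetD_neg_one _ hne]
    conv_rhs => rw [← List.take_append_drop (xs.length / 2) xs]
    rw [ppRef_append]

-- A's fused loop equals the zip-fold over the (p-scaled) prefix products
theorem fused_eq_zip (l : List Int) (d : PySem.Dict Int Int) (p : Int) :
    (l.foldl
      (fun (st : PySem.Dict Int Int × Int) x =>
        (st.1.insert (st.2 * x) x, st.2 * x))
      (d, p)).1
    = (((ppRef l).map (fun y => p * y)).zip l).foldl
        (fun (d : PySem.Dict Int Int) q => d.insert q.1 q.2) d := by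
  induction l generalizing d p with
  | nil => simp [ppRef]
  | cons x xs ih =>
    simp only [List.foldl_cons, ppRef, List.map_cons, List.map_map,
      List.zip_cons_cons, List.foldl_cons]
    rw [ih (d.insert (p * x) x) (p * x)]
    congr 1
    simp [mul_assoc]

-- ===== VERDICT =====
theorem kertomat_spec : Claim_equal_kertomat := by
  intro luvut _
  unfold Spec_kertomat kertomat kertomat_alt
  simp only [pyRange_self_succ, List.foldl_cons, List.foldl_nil]
  rw [fused_eq_zip luvut PySem.Dict.empty 1, prefixesDC_eq]
  simp
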